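-- pv_equiv track=rewrite | github.com/Bipul-Harsh/LocalHackDay-2022-MLH | Task16-Nth PI Value/main.py | find_nth_pi_digit
-- ===== SOURCE A (Python) =====
-- def find_nth_pi_digit(n):
--     rem = 1
--     digit = 0
--     while(n):
--         digit = (rem*10)//7
--         rem = (rem*10)%7
--         n-=1
--     return digit
-- ===== SOURCE B (Python) =====
-- def find_nth_pi_digit(n):
--     # 1/7 = 0.(142857): the nth decimal digit is periodic with period 6.
--     if n <= 0:
--         return 0
--     return (1, 4, 2, 8, 5, 7)[(n - 1) % 6]
-- ===== Notes on version B (the rewrite author's own statement) =====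
-- stated objective: faster
-- what changed: Replaced the n-step long-division loop by an O(1) table lookup into the period-6 digit cycle of 1/7 via (n-1)%6.
-- outside the precondition, e.g. on find_nth_pi_digit(-1): A does not finish within the time limit, B returns 0
import Mathlib
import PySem

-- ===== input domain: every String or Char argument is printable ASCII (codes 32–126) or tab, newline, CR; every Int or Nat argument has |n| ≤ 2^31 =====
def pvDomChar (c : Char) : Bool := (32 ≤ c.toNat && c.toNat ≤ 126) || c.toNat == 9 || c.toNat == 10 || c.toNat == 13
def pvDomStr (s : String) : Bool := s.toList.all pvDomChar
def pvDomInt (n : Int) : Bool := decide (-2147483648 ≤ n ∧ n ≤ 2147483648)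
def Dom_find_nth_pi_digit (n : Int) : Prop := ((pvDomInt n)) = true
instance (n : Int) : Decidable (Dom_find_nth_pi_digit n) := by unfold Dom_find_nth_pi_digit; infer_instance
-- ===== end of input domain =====

-- B replaces A's n-step long-division loop by an O(1) lookup in the period-6 digit cycle of 1/7.

-- ===== PORT A =====
-- A's while-loop, counting n down to 0; state is (rem, digit), updated exactly as in A.
def pvLoopA : Nat → Int → Int → Int
  | 0, _, digit => digit
  | k+1, rem, _ => pvLoopA k (PySem.Int.mod (rem*10) 7) (PySem.Int.floordiv (rem*10) 7)

-- faithful for 0 ≤ n (Pre_); for n < 0 the Python loop never terminates.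
def find_nth_pi_digit (n : Int) : Int := pvLoopA n.toNat 1 0

-- ===== PORT B =====
def find_nth_pi_digit_alt (n : Int) : Int :=
  if n ≤ 0 then 0
  else (PySem.List.pyGet? ([1, 4, 2, 8, 5, 7] : List Int) (PySem.Int.mod (n - 1) 6)).getD 0

-- ===== PRECONDITION & SPEC =====
-- Pre_ excludes n < 0, on which A's 'while(n)' loop never terminates (Python diverges).
def Pre_find_nth_pi_digit (n : Int) : Prop := 0 ≤ n
instance (n : Int) : Decidable (Pre_find_nth_pi_digit n) := by unfold Pre_find_nth_pi_digit; infer_instance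
def pvWitness_find_nth_pi_digit : Int := 8

def Spec_find_nth_pi_digit (n : Int) (out : Int) : Prop := out = find_nth_pi_digit_alt n
instance (n : Int) (out : Int) : Decidable (Spec_find_nth_pi_digit n out) := by unfold Spec_find_nth_pi_digit; infer_instance

-- ===== CLAIM (what is proved, stated in full; the proofs are below) =====
def Claim_equal_find_nth_pi_digit : Prop := ∀ (n : Int), Dom_find_nth_pi_digit n → Pre_find_nth_pi_digit n → Spec_find_nth_pi_digit n (find_nth_pi_digit n)

-- ===== LEMMAS AND PROOFS =====

-- six loop iterations from rem = 1 return to rem = 1 with last digit 7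
lemma pvLoopA_step6 (k : Nat) (d : Int) : pvLoopA (k + 6) 1 d = pvLoopA k 1 7 := by
  show pvLoopA (k+1+1+1+1+1+1) 1 d = pvLoopA k 1 7
  simp only [pvLoopA]
  congr 1

lemma pvLoopA_val (k : Nat) (hk : 1 ≤ k) (d : Int) :
    pvLoopA k 1 d = ([1, 4, 2, 8, 5, 7] : List Int).getD ((k - 1) % 6) 0 := by
  induction k using Nat.strong_induction_on generalizing d with
  | _ k ih =>
    match k, hk with
    | 1, _ => simp [pvLoopA]
    | 2, _ => simp [pvLoopA]
    | 3, _ => simp [pvLoopA]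
    | 4, _ => simp [pvLoopA]
    | 5, _ => simp [pvLoopA]
    | 6, _ => simp [pvLoopA]
    | (m+7), _ =>
      have h6 : m + 7 = (m + 1) + 6 := by omega
      rw [h6, pvLoopA_step6, ih (m+1) (by omega) (by omega)]
      congr 1
      omega

-- ===== VERDICT (by name: the statement is the Claim_ definition above) =====
theorem find_nth_pi_digit_spec : Claim_equal_find_nth_pi_digit := by
  intro n _ hn
  unfold Spec_find_nth_pi_digit find_nth_pi_digit find_nth_pi_digit_alt
  rcases eq_or_lt_of_le hn with h0 | hpos
  · subst h0; simp [pvLoopA]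
  · have hle : ¬ n ≤ 0 := by omega
    rw [if_neg hle]
    have h1 : 1 ≤ n.toNat := by omega
    rw [pvLoopA_val n.toNat h1 0]
    have hm : PySem.Int.mod (n - 1) 6 = (((n.toNat - 1) % 6 : Nat) : Int) := by
      rw [PySem.Int.mod_eq_emod_of_pos (by norm_num : (0:Int) < 6)]
      omega
    rw [hm]
    have hlt : (n.toNat - 1) % 6 < 6 := Nat.mod_lt _ (by norm_num)
    interval_cases h : (n.toNat - 1) % 6 <;> simp
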